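-- pv_equiv track=rewrite | github.com/psionyx2311/Ethereum_Seed_Recovery_BF | seedfarmer.py | fill_placeholders
-- ===== SOURCE A (Python) =====
-- from itertools import product
--
-- def fill_placeholders(words, wordlist):
--     # Fill placeholders with all possible combinations of words from the wordlist
--     indices = [i for i, word in enumerate(words) if word == '?']
--     combinations = list(product(wordlist, repeat=len(indices)))
--     filled_combinations = []
--
--     for combo in combinations:
--         temp_words = words[:]
--         for idx, word in zip(indices, combo):
--             temp_words[idx] = word
--         filled_combinations.append(temp_words)
--
--     return filled_combinations
-- ===== SOURCE B (Python) =====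
-- def fill_placeholders(words, wordlist):
--     # Fill placeholders with all possible combinations of words from the wordlist,
--     # built incrementally (earliest placeholder varies slowest, matching product order)
--     indices = [i for i, word in enumerate(words) if word == '?']
--     results = [words[:]]
--     for idx in indices:
--         new_results = []
--         for partial in results:
--             for w in wordlist:
--                 filled = partial[:]
--                 filled[idx] = w
--                 new_results.append(filled)
--         results = new_results
--     return results
-- ===== Notes on version B (the rewrite author's own statement) =====
-- stated objective: simpler
-- what changed: Replaces itertools.product plus a separate substitution pass over full index/word tuples with an incremental expansion: one list of partial results, each placeholder index expanded in place over the wordlist.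
import Mathlib
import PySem

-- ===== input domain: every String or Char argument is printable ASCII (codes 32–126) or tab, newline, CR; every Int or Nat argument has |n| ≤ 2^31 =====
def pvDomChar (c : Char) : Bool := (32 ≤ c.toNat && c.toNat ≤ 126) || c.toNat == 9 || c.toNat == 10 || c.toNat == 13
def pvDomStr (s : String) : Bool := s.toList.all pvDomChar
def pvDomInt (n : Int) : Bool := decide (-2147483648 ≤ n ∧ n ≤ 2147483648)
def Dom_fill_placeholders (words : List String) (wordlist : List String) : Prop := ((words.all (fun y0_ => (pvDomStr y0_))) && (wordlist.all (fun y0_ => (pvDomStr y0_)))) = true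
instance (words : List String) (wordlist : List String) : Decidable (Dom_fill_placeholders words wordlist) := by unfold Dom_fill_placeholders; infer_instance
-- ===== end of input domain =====

-- B replaces itertools.product + a separate substitution pass by an incremental
-- expansion of one list of partial results (objective: simpler decomposition).

-- ===== PORT A =====
-- itertools.product(wordlist, repeat=k): first component varies slowest.
def pvProduct (wordlist : List String) : Nat → List (List String)
  | 0 => [[]]
  | n + 1 => wordlist.flatMap (fun w => (pvProduct wordlist n).map (fun c => w :: c))

def fill_placeholders (words : List String) (wordlist : List String) : List (List String) :=
  let indices := ((PySem.List.enumerate words 0).filter (fun p => p.2 == "?")).map (·.1)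
  let combinations := pvProduct wordlist indices.length
  let filled_combinations : List (List String) :=
    combinations.foldl (fun acc combo =>
      -- temp_words = words[:]; for idx, word in zip(indices, combo): temp_words[idx] = word
      let temp_words := (indices.zip combo).foldl
        (fun t p => PySem.List.pySetD t p.1 p.2) words
      acc ++ [temp_words]) []
  filled_combinations

-- ===== PORT B =====
def fill_placeholders_alt (words : List String) (wordlist : List String) : List (List String) :=
  let indices := ((PySem.List.enumerate words 0).filter (fun p => p.2 == "?")).map (·.1)
  indices.foldl (fun results idx =>
    results.foldl (fun newResults part =>
      newResults ++ wordlist.foldl (fun acc w =>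
        acc ++ [PySem.List.pySetD part idx w]) []) []) [words]

-- ===== PRECONDITION & SPEC =====
def Spec_fill_placeholders (words : List String) (wordlist : List String) (out : List (List String)) : Prop := out = fill_placeholders_alt words wordlist
instance (words : List String) (wordlist : List String) (out : List (List String)) : Decidable (Spec_fill_placeholders words wordlist out) := by unfold Spec_fill_placeholders; infer_instance

-- ===== CLAIM (what is proved, stated in full; the proofs are below) =====
def Claim_equal_fill_placeholders : Prop := ∀ (words : List String) (wordlist : List String), Dom_fill_placeholders words wordlist → Spec_fill_placeholders words wordlist (fill_placeholders words wordlist)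

-- ===== LEMMAS AND PROOFS =====

-- B's loop body, in normal form (append-folds rewritten to flatMap/map).
def pvBRun (wordlist : List String) (indices : List Int) (acc : List (List String)) : List (List String) :=
  indices.foldl (fun results idx =>
    results.flatMap (fun part => wordlist.map (fun w => PySem.List.pySetD part idx w))) acc

theorem pvBRun_eq_alt (words wordlist : List String) :
    fill_placeholders_alt words wordlist =
      pvBRun wordlist (((PySem.List.enumerate words 0).filter (fun p => p.2 == "?")).map (·.1)) [words] := by
  unfold fill_placeholders_alt pvBRun
  simp only [PySem.List.foldl_append_singleton_eq_map, PySem.List.foldl_append_eq_flatMap,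
    List.nil_append]

theorem pvBRun_cons (wordlist : List String) (i : Int) (is : List Int) (ws : List String) :
    pvBRun wordlist (i :: is) [ws]
      = pvBRun wordlist is (wordlist.map (fun w => PySem.List.pySetD ws i w)) := by
  unfold pvBRun
  rw [List.foldl_cons]
  congr 1
  simp

theorem pvBRun_flatMap (wordlist : List String) (indices : List Int)
    (acc : List (List String)) :
    pvBRun wordlist indices acc = acc.flatMap (fun ws => pvBRun wordlist indices [ws]) := by
  induction indices generalizing acc with
  | nil => simp [pvBRun]
  | cons i is ih =>
    have lhs : pvBRun wordlist (i :: is) acc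
        = pvBRun wordlist is
            (acc.flatMap (fun part => wordlist.map (fun w => PySem.List.pySetD part i w))) := rfl
    rw [lhs, ih, List.flatMap_assoc]
    congr 1
    funext ws
    rw [pvBRun_cons, ih]

theorem pvMain (wordlist : List String) (indices : List Int) (ws : List String) :
    (pvProduct wordlist indices.length).map
      (fun c => (indices.zip c).foldl (fun t p => PySem.List.pySetD t p.1 p.2) ws)
      = pvBRun wordlist indices [ws] := by
  induction indices generalizing ws with
  | nil => simp [pvProduct, pvBRun]
  | cons i is ih =>
    simp only [List.length_cons, pvProduct, List.map_flatMap, List.map_map]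
    have step : ∀ w : String,
        ((pvProduct wordlist is.length).map
          (fun c => (((i :: is).zip (w :: c)).foldl (fun t p => PySem.List.pySetD t p.1 p.2) ws))
          = pvBRun wordlist is [PySem.List.pySetD ws i w]) := by
      intro w
      rw [← ih (PySem.List.pySetD ws i w)]
      rfl
    calc wordlist.flatMap (fun w => (pvProduct wordlist is.length).map
            ((fun c => ((i :: is).zip c).foldl (fun t p => PySem.List.pySetD t p.1 p.2) ws) ∘
              fun c => w :: c))
        = wordlist.flatMap (fun w => pvBRun wordlist is [PySem.List.pySetD ws i w]) := by
          congr 1; funext w; rw [← step w]; rfl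
      _ = pvBRun wordlist (i :: is) [ws] := by
          rw [pvBRun_cons, pvBRun_flatMap wordlist is
            (wordlist.map fun w => PySem.List.pySetD ws i w), List.flatMap_map]

-- ===== VERDICT (by name: the statement is the Claim_ definition above) =====
theorem fill_placeholders_spec : Claim_equal_fill_placeholders := by
  intro words wordlist _
  unfold Spec_fill_placeholders
  unfold fill_placeholders
  rw [pvBRun_eq_alt]
  simp only [PySem.List.foldl_append_singleton_eq_map, List.nil_append]
  exact pvMain wordlist _ words
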